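-- pv_equiv track=rewrite | github.com/wzdlc1996/PhyGO | JobSeeking/leonard/Quant/Problem_02/code.py | solution
-- ===== SOURCE A (Python) =====
-- from typing import List
--
-- def isContain(a: str, b: str) -> bool:
--     if a == b:
--         return True
--     if len(b) == 0:
--         return True
--     if len(a) < len(b):
--         return False
--     if a[0] == b[0]:
--         return isContain(a[1:], b[1:])
--     return isContain(a[1:], b)
--
-- def solution(str_list: List[str]) -> int:
--     sorted_str_list = sorted(str_list, key=lambda x: len(x), reverse=True)
--     max_len_start_at_pos = [1] * len(sorted_str_list)
--     for i in range(len(sorted_str_list) - 2, -1, -1):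
--         temp = 1
--         for j in range(i+1, len(sorted_str_list)):
--             if isContain(sorted_str_list[i], sorted_str_list[j]):
--                 temp = max(temp, max_len_start_at_pos[j] + 1)
--         max_len_start_at_pos[i] = temp
--     return max(max_len_start_at_pos)
-- ===== SOURCE B (Python) =====
-- from typing import List
--
-- def issubseq(small: str, big: str) -> bool:
--     # iterative two-pointer subsequence check: is `small` a subsequence of `big`?
--     k = 0
--     for ch in big:
--         if k < len(small) and small[k] == ch:
--             k += 1
--     return k == len(small)
--
-- def solution(str_list: List[str]) -> int:
--     s = sorted(str_list, key=lambda x: len(x), reverse=True)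
--     best = []  # (string, best chain length starting there) for the suffix seen so far
--     ans = 0
--     for x in reversed(s):
--         v = 1
--         for t, w in best:
--             if issubseq(t, x):
--                 v = max(v, w + 1)
--         best = [(x, v)] + best
--         ans = max(ans, v)
--     return ans
-- ===== Notes on version B (the rewrite author's own statement) =====
-- stated objective: faster
-- what changed: The quadratic slicing recursion isContain is replaced by an iterative two-pointer subsequence check, and the index-array backward DP is replaced by a single reverse pass that folds an accumulator list of (string, chain-length) pairs with a running maximum.
import Mathlib
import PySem

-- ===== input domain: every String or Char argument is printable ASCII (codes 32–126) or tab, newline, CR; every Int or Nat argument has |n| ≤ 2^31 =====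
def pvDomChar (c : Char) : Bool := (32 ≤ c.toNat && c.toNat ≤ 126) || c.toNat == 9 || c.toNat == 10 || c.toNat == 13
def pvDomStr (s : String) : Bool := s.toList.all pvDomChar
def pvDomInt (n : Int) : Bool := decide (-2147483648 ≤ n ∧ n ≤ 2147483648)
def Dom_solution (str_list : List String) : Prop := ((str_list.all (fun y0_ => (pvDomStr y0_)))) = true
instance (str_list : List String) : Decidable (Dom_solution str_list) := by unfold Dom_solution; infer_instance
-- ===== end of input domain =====

-- B replaces A's quadratic slicing recursion (isContain) by an iterative two-pointer
-- subsequence check and A's index-array backward DP by one reverse pass over an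
-- accumulator list with a running maximum; equivalence of the returned value is proved.

-- ===== PORT A =====
-- isContain(a, b): recursive check with slicing, exactly A's branch order
def isContainA (a b : List Char) : Bool :=
  if a = b then true
  else if b.length = 0 then true
  else if a.length < b.length then false
  else
    match a, b with
    | x :: a', y :: b' => if x = y then isContainA a' b' else isContainA a' (y :: b')
    | _, _ => false   -- unreachable: here b ≠ [] and b.length ≤ a.length, so a ≠ []
termination_by a.length
decreasing_by all_goals simp_all

-- the inner 'for j in range(i+1, len(...))' loop of A, computing temp
def innerA (s : List String) (m : List Int) (i : Int) : Int :=
  (PySem.List.pyRange (i + 1) (s.length : Int) 1).foldl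
    (fun temp j =>
      if isContainA (PySem.List.pyGetD s i "").toList (PySem.List.pyGetD s j "").toList
      then max temp (PySem.List.pyGetD m j 0 + 1) else temp) 1

def solution (str_list : List String) : Int :=
  let s := PySem.List.sorted str_list (fun x => PySem.Str.len x) true
  let m := (PySem.List.pyRange ((s.length : Int) - 2) (-1) (-1)).foldl
    (fun m i => PySem.List.pySetD m i (innerA s m i))
    (List.replicate s.length (1 : Int))
  -- Python max(m) raises ValueError on []: Pre_solution excludes the empty list
  (PySem.List.max? m (fun y => y)).getD 0

-- ===== PORT B =====
-- issubseq(small, big): iterative two-pointer subsequence check (pointer k into small)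
def issubseqB (small big : List Char) : Bool :=
  decide ((big.foldl
    (fun k ch => if k < small.length ∧ small.getD k 'a' = ch then k + 1 else k)
    0) = small.length)

-- the 'for t, w in best' loop of B, computing v
def innerB (best : List (String × Int)) (x : String) : Int :=
  best.foldl (fun v p => if issubseqB p.1.toList x.toList then max v (p.2 + 1) else v) 1

def solution_alt (str_list : List String) : Int :=
  let s := PySem.List.sorted str_list (fun x => PySem.Str.len x) true
  (s.reverse.foldl
    (fun (acc : List (String × Int) × Int) x =>
      let v := innerB acc.1 x
      ((x, v) :: acc.1, max acc.2 v))
    ([], 0)).2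

-- ===== PRECONDITION & SPEC =====
-- Pre_ excludes only the empty list, on which Python A raises ValueError (max() of an empty sequence)
def Pre_solution (str_list : List String) : Prop := str_list ≠ []
instance (str_list : List String) : Decidable (Pre_solution str_list) := by
  unfold Pre_solution; infer_instance
def pvWitness_solution : List String := (["ab", "b"])

def Spec_solution (str_list : List String) (out : Int) : Prop := out = solution_alt str_list
instance (str_list : List String) (out : Int) : Decidable (Spec_solution str_list out) := by
  unfold Spec_solution; infer_instance

-- ===== CLAIM (what is proved, stated in full; the proofs are below) =====
def Claim_equal_solution : Prop := ∀ (str_list : List String), Dom_solution str_list →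
  Pre_solution str_list → Spec_solution str_list (solution str_list)
-- ===== LEMMAS AND PROOFS =====

-- reference DP: stepA x pairs = best chain length starting at x given the (string, value)
-- pairs after it; gchain s = the whole DP table for the list s
def stepA (x : String) (pairs : List (String × Int)) : Int :=
  pairs.foldl (fun v p => if isContainA x.toList p.1.toList then max v (p.2 + 1) else v) 1

def gchain : List String → List Int
  | [] => []
  | x :: r => stepA x (r.zip (gchain r)) :: gchain r

-- ---- subsequence checks agree ----

lemma isContainA_iff (a b : List Char) : isContainA a b = true ↔ List.Sublist b a := by
  induction a generalizing b with
  | nil =>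
    cases b with
    | nil =>
      rw [isContainA, if_pos rfl]
      · simp
      · exact fun _ _ _ _ h _ => by simp at h
    | cons y b' =>
      rw [isContainA, if_neg (by simp), if_neg (by simp), if_pos (by simp)]
      · simp
      · exact fun _ _ _ _ h _ => by simp at h
  | cons x a' ih =>
    cases b with
    | nil =>
      rw [isContainA, if_neg (by simp), if_pos (show ([] : List Char).length = 0 from rfl)]
      · simp
      · exact fun _ _ _ _ _ h => by simp at h
    | cons y b' =>
      rw [isContainA]
      by_cases hab : x :: a' = y :: b'
      · rw [if_pos hab, hab]
        simp
      · rw [if_neg hab]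
        rw [if_neg (by simp)]
        by_cases hlen : (x :: a').length < (y :: b').length
        · rw [if_pos hlen]
          constructor
          · intro h; exact absurd h (by simp)
          · intro h; exact absurd h.length_le (by omega)
        · rw [if_neg hlen]
          by_cases hxy : x = y
          · subst hxy
            rw [if_pos rfl]
            rw [ih b']
            exact (List.cons_sublist_cons).symm
          · rw [if_neg hxy]
            rw [ih (y :: b')]
            constructor
            · intro h; exact h.cons _
            · intro h
              cases h with
              | cons _ h2 => exact h2
              | cons₂ => exact absurd rfl (fun h => hxy h.symm)

lemma issubseq_fold (small : List Char) (big : List Char) :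
    ∀ (k : Nat), k ≤ small.length →
    ((big.foldl (fun k ch => if k < small.length ∧ small.getD k 'a' = ch then k + 1 else k) k)
        = small.length ↔ List.Sublist (small.drop k) big) := by
  induction big with
  | nil =>
    intro k hk
    simp only [List.foldl_nil, List.sublist_nil, List.drop_eq_nil_iff]
    omega
  | cons ch bg ih =>
    intro k hk
    simp only [List.foldl_cons]
    by_cases hc : k < small.length ∧ small.getD k 'a' = ch
    · rw [if_pos hc]
      rw [ih (k + 1) (by omega)]
      have hdrop : small.drop k = ch :: small.drop (k + 1) := by
        rw [List.drop_eq_getElem_cons hc.1]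
        congr 1
        have := hc.2
        rwa [List.getD_eq_getElem small 'a' hc.1] at this
      rw [hdrop, List.cons_sublist_cons]
    · rw [if_neg hc]
      rw [ih k hk]
      by_cases hlt : k < small.length
      · have hne : small[k] ≠ ch := by
          intro h; exact hc ⟨hlt, by rwa [List.getD_eq_getElem small 'a' hlt]⟩
        rw [List.drop_eq_getElem_cons hlt]
        constructor
        · intro h; exact h.cons _
        · intro h
          cases h with
          | cons _ h2 => exact h2
          | cons₂ => exact absurd rfl hne
      · have : small.drop k = [] := List.drop_eq_nil_iff.mpr (by omega)
        simp [this]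

lemma issubseqB_eq (a b : List Char) : issubseqB b a = isContainA a b := by
  rw [Bool.eq_iff_iff]
  rw [isContainA_iff]
  unfold issubseqB
  rw [decide_eq_true_iff]
  have := issubseq_fold b a 0 (by omega)
  simpa using this

-- ---- facts about the reference DP ----

lemma foldl_if_max_ge {α : Type} (c : α → Bool) (e : α → Int) :
    ∀ (l : List α) (init : Int),
    init ≤ l.foldl (fun v p => if c p then max v (e p) else v) init := by
  intro l
  induction l with
  | nil => intro init; simp
  | cons p t ih =>
    intro init
    simp only [List.foldl_cons]
    refine le_trans ?_ (ih _)
    split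
    · exact le_max_left _ _
    · exact le_refl _

lemma stepA_ge_one (x : String) (pairs : List (String × Int)) : 1 ≤ stepA x pairs := by
  unfold stepA
  exact foldl_if_max_ge (fun p => isContainA x.toList p.1.toList) (fun p => p.2 + 1) pairs 1

lemma gchain_length (s : List String) : (gchain s).length = s.length := by
  induction s with
  | nil => rfl
  | cons x r ih => simp [gchain, ih]

lemma gchain_ge_one (s : List String) : ∀ w ∈ gchain s, 1 ≤ w := by
  induction s with
  | nil => intro w hw; simp [gchain] at hw
  | cons x r ih =>
    intro w hw
    simp only [gchain, List.mem_cons] at hw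
    rcases hw with h | h
    · subst h; exact stepA_ge_one _ _
    · exact ih w h

-- ---- A's inner loop is stepA on the zipped suffix ----

lemma innerA_fold (s : List String) (m : List Int) (x : String)
    (hm : m.length = s.length) :
    ∀ (d k : Nat), k + d = s.length → ∀ (init : Int),
    (PySem.List.pyRange (k : Int) (s.length : Int) 1).foldl
      (fun temp j =>
        if isContainA x.toList (PySem.List.pyGetD s j "").toList
        then max temp (PySem.List.pyGetD m j 0 + 1) else temp) init
    = ((s.drop k).zip (m.drop k)).foldl
        (fun v p => if isContainA x.toList p.1.toList then max v (p.2 + 1) else v) init := by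
  intro d
  induction d with
  | zero =>
    intro k hk init
    have h1 : PySem.List.pyRange (k : Int) (s.length : Int) 1 = [] :=
      PySem.List.pyRange_one_eq_nil (by omega)
    have h2 : s.drop k = [] := List.drop_eq_nil_iff.mpr (by omega)
    simp [h1, h2]
  | succ d' ih =>
    intro k hk init
    have hklt : k < s.length := by omega
    have hmlt : k < m.length := by omega
    have h1 : PySem.List.pyRange (k : Int) (s.length : Int) 1
        = (k : Int) :: PySem.List.pyRange ((k : Int) + 1) (s.length : Int) 1 :=
      PySem.List.pyRange_one_cons (by exact_mod_cast hklt)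
    rw [h1, List.foldl_cons]
    have hcast : ((k : Int) + 1) = ((k + 1 : Nat) : Int) := by push_cast; ring
    rw [hcast, ih (k + 1) (by omega)]
    have hs : s.drop k = s[k] :: s.drop (k + 1) := List.drop_eq_getElem_cons hklt
    have hm' : m.drop k = m[k] :: m.drop (k + 1) := List.drop_eq_getElem_cons hmlt
    rw [hs, hm', List.zip_cons_cons, List.foldl_cons]
    have hgs : PySem.List.pyGetD s (k : Int) "" = s[k] := by
      rw [PySem.List.pyGetD_natCast, List.getD_eq_getElem s "" hklt]
    have hgm : PySem.List.pyGetD m (k : Int) 0 = m[k] := by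
      rw [PySem.List.pyGetD_natCast, List.getD_eq_getElem m 0 hmlt]
    rw [hgs, hgm]

-- set at the boundary of a replicate block
lemma set_replicate_append (k : Nat) (v : Int) (tail : List Int) :
    (List.replicate (k + 1) (1 : Int) ++ tail).set k v
      = List.replicate k 1 ++ v :: tail := by
  induction k with
  | zero => simp [List.replicate_succ]
  | succ k' ih => simpa [List.replicate_succ] using ih

-- ---- A's outer countdown loop builds gchain ----

lemma outerA (s : List String) :
    ∀ (d : Nat), d ≤ s.length - 1 → s ≠ [] →
    (PySem.List.pyRange ((s.length : Int) - 2) ((s.length : Int) - 2 - d) (-1)).foldl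
      (fun m i => PySem.List.pySetD m i (innerA s m i))
      (List.replicate s.length (1 : Int))
    = List.replicate (s.length - 1 - d) 1 ++ gchain (s.drop (s.length - 1 - d)) := by
  intro d
  induction d with
  | zero =>
    intro _ hs
    have hn : 1 ≤ s.length := by
      cases s with
      | nil => exact absurd rfl hs
      | cons _ _ => simp
    rw [PySem.List.pyRange_neg_one_eq_nil (by omega), List.foldl_nil]
    -- s.drop (len - 1) is the last element; gchain of a singleton is [1]
    have hlast : s.drop (s.length - 1) = [s[s.length - 1]] :=
      by
        rw [List.drop_eq_getElem_cons (by omega)]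
        congr 1
        exact List.drop_eq_nil_iff.mpr (by omega)
    rw [Nat.sub_zero, hlast]
    have : gchain [s[s.length - 1]] = [1] := by simp [gchain, stepA]
    rw [this]
    have : s.length = (s.length - 1) + 1 := by omega
    rw [this]
    simp [List.replicate_succ']
  | succ d' ih =>
    intro hd hs
    have hn : d' + 2 ≤ s.length := by omega
    set n := s.length with hnd
    set k : Nat := n - 2 - d' with hkd
    -- peel the last iteration (index k) off the countdown range
    have hsplit : PySem.List.pyRange ((n : Int) - 2) ((n : Int) - 2 - (d' + 1)) (-1)
        = PySem.List.pyRange ((n : Int) - 2) ((n : Int) - 2 - d') (-1) ++ [(k : Int)] := by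
      rw [PySem.List.pyRange_neg_one_eq_reverse, PySem.List.pyRange_neg_one_eq_reverse]
      have h1 : ((n : Int) - 2 - (d' + 1)) + 1 = (k : Int) := by
        simp only [hkd]; omega
      have h2 : ((n : Int) - 2 - d') + 1 = (k : Int) + 1 := by
        simp only [hkd]; omega
      rw [h1, h2]
      have h3 : PySem.List.pyRange (k : Int) ((n : Int) - 2 + 1) 1
          = (k : Int) :: PySem.List.pyRange ((k : Int) + 1) ((n : Int) - 2 + 1) 1 :=
        PySem.List.pyRange_one_cons (by simp only [hkd]; omega)
      rw [h3, List.reverse_cons]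
    rw [show ((d' + 1 : Nat) : Int) = (d' : Int) + 1 by push_cast; ring]
    rw [hsplit, List.foldl_append, List.foldl_cons, List.foldl_nil]
    rw [ih (by omega) hs]
    have hk1 : n - 1 - d' = k + 1 := by omega
    rw [hk1]
    -- the state before this iteration
    set m : List Int := List.replicate (k + 1) 1 ++ gchain (s.drop (k + 1)) with hmd
    have hmlen : m.length = n := by
      simp only [hmd, List.length_append, List.length_replicate, gchain_length,
        List.length_drop]
      omega
    have hmdrop : m.drop (k + 1) = gchain (s.drop (k + 1)) := by
      simp only [hmd]
      exact List.drop_left' (by simp)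
    have hklt : k < n := by omega
    -- innerA at index k
    have hinner : innerA s m (k : Int) = stepA s[k] ((s.drop (k + 1)).zip (m.drop (k + 1))) := by
      unfold innerA
      have hgs : PySem.List.pyGetD s (k : Int) "" = s[k] := by
        rw [PySem.List.pyGetD_natCast, List.getD_eq_getElem s "" hklt]
      rw [hgs]
      have hcast : ((k : Int) + 1) = ((k + 1 : Nat) : Int) := by push_cast; ring
      rw [hcast]
      rw [innerA_fold s m s[k] hmlen (n - (k + 1)) (k + 1) (by omega) 1]
      rfl
    rw [PySem.List.pySetD_natCast]
    have hset : m.set k (innerA s m (k : Int))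
        = List.replicate k 1 ++ innerA s m (k : Int) :: gchain (s.drop (k + 1)) := by
      rw [hmd]
      exact set_replicate_append k _ _
    rw [hset, hinner, hmdrop]
    have hdropk : s.drop k = s[k] :: s.drop (k + 1) := List.drop_eq_getElem_cons hklt
    have hkk : n - 1 - (d' + 1) = k := by omega
    rw [hkk, hdropk]
    simp only [gchain]

-- ---- B's reverse pass builds the zipped table and the running max ----

lemma innerB_eq (best : List (String × Int)) (x : String) : innerB best x = stepA x best := by
  unfold innerB stepA
  simp only [issubseqB_eq]

lemma foldrB (s : List String) :
    s.reverse.foldl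
      (fun (acc : List (String × Int) × Int) x =>
        let v := innerB acc.1 x
        ((x, v) :: acc.1, max acc.2 v))
      ([], 0)
    = (s.zip (gchain s), (gchain s).foldr (fun w acc => max acc w) 0) := by
  induction s with
  | nil => rfl
  | cons x r ih =>
    rw [List.reverse_cons, List.foldl_append, ih, List.foldl_cons, List.foldl_nil]
    simp only [gchain, List.zip_cons_cons, List.foldr_cons]
    rw [innerB_eq]

-- ---- running max over a list of values ≥ 1 ----

lemma foldl_max_out (t : List Int) : ∀ (a x : Int),
    t.foldl max (max a x) = max (t.foldl max a) x := by
  induction t with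
  | nil => intro a x; simp
  | cons y t' ih =>
    intro a x
    simp only [List.foldl_cons]
    rw [max_right_comm a x y]
    exact ih (max a y) x

lemma foldr_max_eq_foldl (l : List Int) : ∀ (a : Int),
    l.foldr (fun w acc => max acc w) a = l.foldl max a := by
  induction l with
  | nil => intro a; rfl
  | cons x t ih =>
    intro a
    simp only [List.foldr_cons, List.foldl_cons, ih]
    exact (foldl_max_out t a x).symm

-- ---- the two ports agree for every list (sorted or not) ----

lemma core_eq (s : List String) :
    (PySem.List.max?
      ((PySem.List.pyRange ((s.length : Int) - 2) (-1) (-1)).foldl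
        (fun m i => PySem.List.pySetD m i (innerA s m i))
        (List.replicate s.length (1 : Int)))
      (fun y => y)).getD 0
    = (s.reverse.foldl
        (fun (acc : List (String × Int) × Int) x =>
          let v := innerB acc.1 x
          ((x, v) :: acc.1, max acc.2 v))
        ([], 0)).2 := by
  rw [foldrB s]
  cases hsnil : s with
  | nil =>
    simp only [List.length_nil, Nat.cast_zero, gchain, List.foldr_nil, List.replicate_zero]
    rw [PySem.List.pyRange_neg_one_eq_nil (by norm_num), List.foldl_nil]
    rfl
  | cons x0 r0 =>
    rw [← hsnil]
    have hs : s ≠ [] := by rw [hsnil]; exact List.cons_ne_nil _ _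
    have hn : 1 ≤ s.length := by rw [hsnil]; simp
    have hA := outerA s (s.length - 1) (le_refl _) hs
    have hend : ((s.length : Int) - 2 - ((s.length - 1 : Nat) : Int)) = -1 := by
      push_cast [hn]; omega
    rw [hend] at hA
    have hz : s.length - 1 - (s.length - 1) = 0 := by omega
    rw [hz] at hA
    simp only [List.replicate_zero, List.nil_append, List.drop_zero] at hA
    rw [hA]
    -- max(list) of the nonempty gchain s versus the running max from 0
    have hglen : gchain s ≠ [] := by
      intro h
      have := gchain_length s
      rw [h] at this
      simp at this
      omega
    cases hg : gchain s with
    | nil => exact absurd hg hglen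
    | cons w t =>
      rw [PySem.List.max?_id_cons, Option.getD_some]
      rw [foldr_max_eq_foldl, List.foldl_cons]
      have hw1 : 1 ≤ w := gchain_ge_one s w (by rw [hg]; exact List.mem_cons_self)
      rw [show max (0 : Int) w = w by omega]

-- ===== VERDICT (by name: the statement is the Claim_ definition above) =====
theorem solution_spec : Claim_equal_solution := by
  intro str_list _ _
  unfold Spec_solution solution solution_alt
  exact core_eq _
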